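-- pv_equiv track=rewrite | github.com/softagram/mypy | mypy/stubutil.py | find_unique_signatures
-- ===== SOURCE A (Python) =====
-- from typing import Optional, Tuple, Sequence, MutableSequence, List, MutableMapping, IO, NamedTuple
--
-- Sig = Tuple[str, str]
--
-- def find_unique_signatures(sigs: Sequence[Sig]) -> List[Sig]:
--     sig_map = {}  # type: MutableMapping[str, List[str]]
--     for name, sig in sigs:
--         sig_map.setdefault(name, []).append(sig)
--     result = []
--     for name, name_sigs in sig_map.items():
--         if len(set(name_sigs)) == 1:
--             result.append((name, name_sigs[0]))
--     return sorted(result)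
-- ===== SOURCE B (Python) =====
-- def find_unique_signatures(sigs):
--     # One pass: name -> (first signature seen, still-unique flag); no per-name
--     # list of all signatures and no set() pass afterwards.
--     status = {}
--     for name, sig in sigs:
--         cur = status.get(name)
--         if cur is None:
--             status[name] = (sig, True)
--         elif cur[1] and cur[0] != sig:
--             status[name] = (cur[0], False)
--     return sorted((name, sig) for name, (sig, ok) in status.items() if ok)
-- ===== Notes on version B (the rewrite author's own statement) =====
-- stated objective: simpler
-- what changed: Single pass keeping only a representative signature plus a uniqueness flag per name, instead of grouping all signatures per name and running a len(set(...))==1 check in a second pass.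
import Mathlib
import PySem

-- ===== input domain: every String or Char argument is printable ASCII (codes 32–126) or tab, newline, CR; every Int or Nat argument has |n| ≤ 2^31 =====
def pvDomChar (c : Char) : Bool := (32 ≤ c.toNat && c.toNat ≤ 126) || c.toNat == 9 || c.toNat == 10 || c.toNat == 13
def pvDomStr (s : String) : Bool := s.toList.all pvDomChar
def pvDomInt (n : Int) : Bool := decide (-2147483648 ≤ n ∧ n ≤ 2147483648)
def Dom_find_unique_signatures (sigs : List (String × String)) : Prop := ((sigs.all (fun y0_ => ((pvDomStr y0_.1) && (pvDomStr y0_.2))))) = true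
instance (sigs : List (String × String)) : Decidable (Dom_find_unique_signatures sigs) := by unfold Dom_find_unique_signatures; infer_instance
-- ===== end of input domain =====

-- B replaces A's group-all-signatures-then-len(set)==1 test by a single pass that keeps
-- only a representative signature plus a uniqueness flag per name (objective: simpler).

-- ===== PORT A =====
-- sig_map.setdefault(name, []).append(sig)  ≡  d.modify name [] (· ++ [sig]);
-- name_sigs[0] is rendered as headD "" (the guard len(set(name_sigs)) == 1 guarantees nonemptiness);
-- sorted(result) on pairs of strings is lexicographic = sorted2 by fst then snd.
def find_unique_signatures (sigs : List (String × String)) : List (String × String) :=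
  PySem.List.sorted2
    ((sigs.foldl (fun d p => d.modify p.1 [] (· ++ [p.2]))
        (PySem.Dict.empty : PySem.Dict String (List String))).items.foldl
      (fun acc p => if (PySem.Set.ofList p.2).length == 1 then acc ++ [(p.1, p.2.headD "")] else acc)
      [])
    (·.1) (·.2) false

-- ===== PORT B =====
-- status[name] = (sig, True) on first sight; flag cleared when a different sig appears;
-- the generator expression becomes filter + map, sorted(...) is sorted2 as above.
def find_unique_signatures_alt (sigs : List (String × String)) : List (String × String) :=
  PySem.List.sorted2
    ((((sigs.foldl (fun d p =>
          match d.get? p.1 with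
          | none => d.insert p.1 (p.2, true)
          | some cur => if cur.2 && cur.1 != p.2 then d.insert p.1 (cur.1, false) else d)
        (PySem.Dict.empty : PySem.Dict String (String × Bool))).items.filter
        (fun q => q.2.2)).map (fun q => (q.1, q.2.1))))
    (·.1) (·.2) false

-- ===== PRECONDITION & SPEC =====
def Spec_find_unique_signatures (sigs : List (String × String)) (out : List (String × String)) : Prop := out = find_unique_signatures_alt sigs
instance (sigs : List (String × String)) (out : List (String × String)) : Decidable (Spec_find_unique_signatures sigs out) := by unfold Spec_find_unique_signatures; infer_instance

-- ===== CLAIM (what is proved, stated in full; the proofs are below) =====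
def Claim_equal_find_unique_signatures : Prop := ∀ (sigs : List (String × String)), Dom_find_unique_signatures sigs → Spec_find_unique_signatures sigs (find_unique_signatures sigs)

-- ===== LEMMAS AND PROOFS =====

-- The correspondence between A's dict entries (name, all sigs) and B's entries (name, (first sig, unique flag)).
def pvF (p : String × List String) : String × (String × Bool) :=
  (p.1, (p.2.headD "", p.2.all (fun s => s == p.2.headD "")))

theorem pv_get?_map (its : List (String × List String)) (n : String) :
    (PySem.Dict.mk (its.map pvF)).get? n
      = ((PySem.Dict.mk its).get? n).map (fun l => (l.headD "", l.all (fun s => s == l.headD ""))) := by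
  induction its with
  | nil => rfl
  | cons p t ih =>
      obtain ⟨pn, pv⟩ := p
      rw [List.map_cons,
          show pvF (pn, pv) = (pn, (pv.headD "", pv.all (fun s => s == pv.headD ""))) from rfl,
          PySem.Dict.get?_mk_cons, PySem.Dict.get?_mk_cons]
      cases hb : (pn == n) <;> simp [ih]

theorem pv_all_eq_nodup (xs : List String) (a : String) (hn : xs.Nodup) (hm : a ∈ xs)
    (ha : ∀ x ∈ xs, x = a) : xs = [a] := by
  cases xs with
  | nil => simp at hm
  | cons b t =>
      have hb : b = a := ha b (by simp)
      subst hb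
      cases t with
      | nil => rfl
      | cons c u =>
          have hc : c = b := ha c (by simp)
          subst hc
          simp at hn

theorem pv_len_one (l : List String) (hl : l ≠ []) :
    ((PySem.Set.ofList l).length == 1) = l.all (fun s => s == l.headD "") := by
  cases l with
  | nil => exact absurd rfl hl
  | cons h t =>
      simp only [List.headD_cons]
      rw [Bool.eq_iff_iff]
      simp only [beq_iff_eq, List.all_eq_true]
      constructor
      · intro h1 x hx
        rw [List.length_eq_one_iff] at h1
        obtain ⟨y, hy⟩ := h1
        have hhm : h ∈ PySem.Set.ofList (h :: t) := (PySem.Set.mem_ofList _ _).mpr (by simp)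
        have hxm : x ∈ PySem.Set.ofList (h :: t) := (PySem.Set.mem_ofList _ _).mpr hx
        rw [hy] at hhm hxm
        simp at hhm hxm
        rw [hxm, hhm]
      · intro hall
        have hone : PySem.Set.ofList (h :: t) = [h] := by
          apply pv_all_eq_nodup _ _ (PySem.Set.nodup_ofList _)
            ((PySem.Set.mem_ofList _ _).mpr (by simp))
          intro x hx
          exact hall x ((PySem.Set.mem_ofList _ _).mp hx)
        rw [hone]
        rfl

-- One step of the two loops preserves the correspondence (plus: entries nonempty, keys nodup).
theorem pv_step (d1 : PySem.Dict String (List String)) (d2 : PySem.Dict String (String × Bool))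
    (n sg : String)
    (h : d2.items = d1.items.map pvF) (hne : ∀ p ∈ d1.items, p.2 ≠ []) (hnd : d1.keys.Nodup) :
    ((match d2.get? n with
      | none => d2.insert n (sg, true)
      | some cur => if cur.2 && cur.1 != sg then d2.insert n (cur.1, false) else d2) :
        PySem.Dict String (String × Bool)).items
        = (d1.modify n [] (· ++ [sg])).items.map pvF
    ∧ (∀ p ∈ (d1.modify n [] (· ++ [sg])).items, p.2 ≠ [])
    ∧ (d1.modify n [] (· ++ [sg])).keys.Nodup := by
  have hd2 : d2 = PySem.Dict.mk (d1.items.map pvF) := PySem.Dict.ext h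
  have hget : d2.get? n = (d1.get? n).map (fun l => (l.headD "", l.all (fun s => s == l.headD ""))) := by
    rw [hd2, pv_get?_map]
  have hmod : d1.modify n [] (· ++ [sg]) = d1.insert n (d1.getD n [] ++ [sg]) := rfl
  cases hcase : d1.get? n with
  | none =>
      have hc : d1.contains n = false := by
        rw [PySem.Dict.contains_eq_isSome_get?, hcase]; rfl
      have hg2 : d2.get? n = none := by rw [hget, hcase]; rfl
      have hc2 : d2.contains n = false := by
        rw [PySem.Dict.contains_eq_isSome_get?, hg2]; rfl
      have hgd : d1.getD n [] = [] := PySem.Dict.getD_of_not_contains _ _ hc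
      rw [hg2, hmod, hgd]
      refine ⟨?_, ?_, ?_⟩
      · show (d2.insert n (sg, true)).items = _
        rw [PySem.Dict.items_insert_of_not_contains _ _ hc2,
            PySem.Dict.items_insert_of_not_contains _ _ hc, List.map_append, h]
        simp [pvF]
      · rw [PySem.Dict.items_insert_of_not_contains _ _ hc]
        intro p hp
        rcases List.mem_append.mp hp with hp | hp
        · exact hne p hp
        · simp at hp; rw [hp]; simp
      · rw [PySem.Dict.keys_insert_of_not_contains _ _ hc]
        have hnm : n ∉ d1.keys := by
          intro hmem
          rw [(PySem.Dict.contains_iff_mem_keys _ _).mpr hmem] at hc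
          exact absurd hc (by simp)
        simp [List.nodup_append, hnd]
        intro a ha hEq
        exact hnm (hEq ▸ ha)
  | some l =>
      have hmem : (n, l) ∈ d1.items := PySem.Dict.mem_items_of_get?_eq_some _ hcase
      have hl : l ≠ [] := hne _ hmem
      have hc : d1.contains n = true := by
        rw [PySem.Dict.contains_eq_isSome_get?, hcase]; rfl
      have hgd : d1.getD n [] = l := PySem.Dict.getD_of_get?_eq_some _ _ hcase
      have huniq : ∀ p ∈ d1.items, p.1 = n → p = (n, l) := by
        intro p hp hp1
        obtain ⟨pn, pv⟩ := p
        simp only at hp1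
        subst hp1
        have hgp := PySem.Dict.get?_of_mem_items _ hp hnd
        rw [hcase] at hgp
        simp at hgp
        rw [hgp]
      obtain ⟨h0, t1, rfl⟩ := List.exists_cons_of_ne_nil hl
      have hg2 : d2.get? n = some (h0, (h0 :: t1).all (fun x => x == h0)) := by
        rw [hget, hcase]; simp
      have hc2 : d2.contains n = true := by
        rw [PySem.Dict.contains_eq_isSome_get?, hg2]; rfl
      rw [hg2, hmod, hgd]
      refine ⟨?_, ?_, ?_⟩
      · show (if ((h0 :: t1).all (fun x => x == h0) && (h0 != sg)) = true
              then d2.insert n (h0, false) else d2).items = _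
        rw [PySem.Dict.items_insert_of_contains _ _ hc]
        cases hok : ((h0 :: t1).all (fun x => x == h0) && (h0 != sg)) with
        | true =>
            rw [if_pos rfl,
                PySem.Dict.items_insert_of_contains _ _ hc2, h, List.map_map, List.map_map]
            apply List.map_congr_left
            intro p hp
            simp only [Function.comp_apply]
            cases hb : (p.1 == n) with
            | true =>
                have hpeq := huniq p hp (by simpa using hb)
                subst hpeq
                obtain ⟨hok1, hok2⟩ := Bool.and_eq_true_iff.mp hok
                have hs : (sg == h0) = false := by
                  have hne' : h0 ≠ sg := bne_iff_ne.mp hok2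
                  simp [beq_eq_false_iff_ne]
                  exact fun he => hne' he.symm
                simp [pvF, List.all_append, hs]
            | false =>
                simp [pvF, hb]
        | false =>
            rw [if_neg (by simp), h, List.map_map]
            apply List.map_congr_left
            intro p hp
            simp only [Function.comp_apply]
            cases hb : (p.1 == n) with
            | true =>
                have hpeq := huniq p hp (by simpa using hb)
                subst hpeq
                rcases Bool.and_eq_false_iff.mp hok with hok1 | hok2
                · simp only [List.all_cons, beq_self_eq_true, Bool.true_and] at hok1
                  simp [pvF, List.all_append, hok1]
                · have hse : h0 = sg := by simpa using hok2
                  subst hse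
                  simp [pvF, List.all_append]
            | false =>
                simp [pvF]
      · rw [PySem.Dict.items_insert_of_contains _ _ hc]
        intro p hp
        rcases List.mem_map.mp hp with ⟨p', hp', rfl⟩
        cases hb : (p'.1 == n) with
        | true => simp
        | false => simpa using hne p' hp'
      · rw [PySem.Dict.keys_insert_of_contains _ _ hc]
        exact hnd

-- The loop invariant, carried through both folds at once.
theorem pv_inv (sigs : List (String × String)) (d1 : PySem.Dict String (List String))
    (d2 : PySem.Dict String (String × Bool))
    (h : d2.items = d1.items.map pvF) (hne : ∀ p ∈ d1.items, p.2 ≠ []) (hnd : d1.keys.Nodup) :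
    (sigs.foldl (fun d p =>
        match d.get? p.1 with
        | none => d.insert p.1 (p.2, true)
        | some cur => if cur.2 && cur.1 != p.2 then d.insert p.1 (cur.1, false) else d) d2).items
      = (sigs.foldl (fun d p => d.modify p.1 [] (· ++ [p.2])) d1).items.map pvF
    ∧ (∀ p ∈ (sigs.foldl (fun d p => d.modify p.1 [] (· ++ [p.2])) d1).items, p.2 ≠ [])
    ∧ (sigs.foldl (fun d p => d.modify p.1 [] (· ++ [p.2])) d1).keys.Nodup := by
  induction sigs generalizing d1 d2 with
  | nil => exact ⟨h, hne, hnd⟩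
  | cons q t ih =>
      simp only [List.foldl_cons]
      obtain ⟨hA, hB, hC⟩ := pv_step d1 d2 q.1 q.2 h hne hnd
      exact ih _ _ hA hB hC

-- ===== VERDICT (by name: the statement is the Claim_ definition above) =====
theorem find_unique_signatures_spec : Claim_equal_find_unique_signatures := by
  unfold Claim_equal_find_unique_signatures
  intro sigs _
  unfold Spec_find_unique_signatures find_unique_signatures find_unique_signatures_alt
  obtain ⟨hA, hne, _⟩ := pv_inv sigs PySem.Dict.empty PySem.Dict.empty rfl
    (by intro p hp; simp [PySem.Dict.empty] at hp)
    (PySem.Dict.nodup_keys_empty (κ := String) (ν := List String))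
  rw [hA, PySem.List.foldl_append_if, List.filter_map, List.map_map, List.nil_append]
  rw [List.filter_congr (fun p hp => pv_len_one p.2 (hne p hp))]
  congr 1
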